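-- pv_equiv track=rewrite | github.com/LoveSims/Platform | llm_utils.py | modular_instructions
-- ===== SOURCE A (Python) =====
-- def make_output_format(modules):
--     output_format = "Output Format:\n{\n"
--     for module in modules:
--         if 'name' in module and module['name']:
--             output_format += f'    "{module["name"].lower()}": "<your response>",\n'
--     output_format = output_format.rstrip(',\n') + "\n}"
--     return output_format
--
-- def modular_instructions(modules):
--     """
--     Given some modules in the form:
--
--     name (optional, makes it a step)
--     instruction (required)
--
--     make the whole prompt.
--     """
--     prompt = ""
--     step_count = 0
--     for module in modules:
--         if 'name' in module:
--             step_count += 1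
--             prompt += f"Step {step_count} ({module['name']}): {module['instruction']}\n"
--         else:
--             prompt += f"{module['instruction']}\n"
--     prompt += "\n"
--     prompt += make_output_format(modules)
--     return prompt
-- ===== SOURCE B (Python) =====
-- def modular_instructions(modules):
--     step_lines = []
--     entries = []
--     step = 0
--     for module in modules:
--         if 'name' in module:
--             step += 1
--             step_lines.append(f"Step {step} ({module['name']}): {module['instruction']}")
--             if module['name']:
--                 entries.append(f'    "{module["name"].lower()}": "<your response>"')
--         else:
--             step_lines.append(module['instruction'])
--     if entries:
--         fmt = "Output Format:\n{\n" + ",\n".join(entries) + "\n}"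
--     else:
--         fmt = "Output Format:\n{\n}"
--     return "\n".join(step_lines + ["", fmt])
-- ===== Notes on version B (the rewrite author's own statement) =====
-- stated objective: alternative
-- what changed: One pass collects step lines and format entries into lists and assembles the result with explicit joins, replacing A's two traversals with string += accumulation and the final rstrip(',\n') trailing-comma fixup.
-- outside the precondition, e.g. on modular_instructions([{'name': 'x'}]): A raises KeyError, B raises KeyError
import Mathlib
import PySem

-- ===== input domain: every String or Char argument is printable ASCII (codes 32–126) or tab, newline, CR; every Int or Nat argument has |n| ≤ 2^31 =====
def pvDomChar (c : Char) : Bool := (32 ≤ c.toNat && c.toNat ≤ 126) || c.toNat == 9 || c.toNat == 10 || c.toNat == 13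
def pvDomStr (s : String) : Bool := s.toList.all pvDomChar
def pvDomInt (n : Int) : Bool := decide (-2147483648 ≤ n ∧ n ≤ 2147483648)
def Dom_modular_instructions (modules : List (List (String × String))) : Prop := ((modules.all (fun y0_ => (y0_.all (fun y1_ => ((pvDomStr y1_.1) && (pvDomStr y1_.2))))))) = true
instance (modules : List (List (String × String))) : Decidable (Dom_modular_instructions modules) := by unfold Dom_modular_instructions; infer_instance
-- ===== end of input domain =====

-- B replaces A's string += accumulation and the final rstrip(',\n') by one pass collecting
-- step lines and format entries, assembled with explicit joins (objective: alternative decomposition).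

-- dict access shared by both ports (module[k] / 'k' in module)
def pvLookup (m : List (String × String)) (k : String) : Option String :=
  (PySem.Dict.ofList m).get? k

-- the f-string "Step {sc} ({name}): {instr}" used verbatim by both Pythons
def pvStepLine (sc : Int) (n instr : String) : List Char :=
  "Step ".toList ++ (PySem.Int.toStr sc).toList ++ " (".toList ++ n.toList
    ++ "): ".toList ++ instr.toList

-- ===== PORT A =====
-- hand port of s.rstrip(',\n') (strip trailing ',' and '\n' chars): exact
def pvRstripCommaNl (s : List Char) : List Char :=
  (s.reverse.dropWhile (fun c => c == ',' || c == '\n')).reverse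

-- loop body of make_output_format (module['instruction'] KeyError is excluded by Pre_)
def pvStepFmt (acc : List Char) (m : List (String × String)) : List Char :=
  match pvLookup m "name" with
  | some n => if n ≠ "" then
      acc ++ "    \"".toList ++ (PySem.Chars.lower n.toList) ++ "\": \"<your response>\",\n".toList
    else acc
  | none => acc

def make_output_format (modules : List (List (String × String))) : List Char :=
  pvRstripCommaNl (modules.foldl pvStepFmt "Output Format:\n{\n".toList) ++ "\n}".toList

-- loop body of A's prompt loop: state = (prompt, step_count)
def pvStepA (st : List Char × Int) (m : List (String × String)) : List Char × Int :=
  match pvLookup m "name" with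
  | some n =>
      (st.1 ++ pvStepLine (st.2 + 1) n ((pvLookup m "instruction").getD "") ++ ['\n'], st.2 + 1)
  | none => (st.1 ++ ((pvLookup m "instruction").getD "").toList ++ ['\n'], st.2)

def modular_instructions (modules : List (List (String × String))) : String :=
  let st := modules.foldl pvStepA ([], 0)
  String.ofList (st.1 ++ ['\n'] ++ make_output_format modules)

-- ===== PORT B =====
def pvEntryB (n : String) : List Char :=
  "    \"".toList ++ (PySem.Chars.lower n.toList) ++ "\": \"<your response>\"".toList

-- loop body of B's single pass: state = (step_lines, entries, step)
def pvStepB (st : List (List Char) × List (List Char) × Int) (m : List (String × String)) :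
    List (List Char) × List (List Char) × Int :=
  match pvLookup m "name" with
  | some n =>
      (st.1 ++ [pvStepLine (st.2.2 + 1) n ((pvLookup m "instruction").getD "")],
       st.2.1 ++ (if n ≠ "" then [pvEntryB n] else []),
       st.2.2 + 1)
  | none => (st.1 ++ [((pvLookup m "instruction").getD "").toList], st.2.1, st.2.2)

def modular_instructions_alt (modules : List (List (String × String))) : String :=
  let st := modules.foldl pvStepB ([], [], 0)
  let fmt := if st.2.1 ≠ [] then
      "Output Format:\n{\n".toList ++ PySem.Chars.join [',', '\n'] st.2.1 ++ "\n}".toList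
    else "Output Format:\n{\n}".toList
  String.ofList (PySem.Chars.join ['\n'] (st.1 ++ [[], fmt]))

-- ===== PRECONDITION & SPEC =====
-- Pre_ excludes modules missing the 'instruction' key, on which the Python A raises KeyError.
def Pre_modular_instructions (modules : List (List (String × String))) : Prop :=
  ∀ m ∈ modules, "instruction" ∈ m.map Prod.fst
instance (modules : List (List (String × String))) : Decidable (Pre_modular_instructions modules) := by
  unfold Pre_modular_instructions; infer_instance

def pvWitness_modular_instructions : (List (List (String × String))) :=
  [[("name", "Plan"), ("instruction", "think")], [("instruction", "just do it")]]

def Spec_modular_instructions (modules : List (List (String × String))) (out : String) : Prop := out = modular_instructions_alt modules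
instance (modules : List (List (String × String))) (out : String) : Decidable (Spec_modular_instructions modules out) := by unfold Spec_modular_instructions; infer_instance

-- ===== CLAIM (what is proved, stated in full; the proofs are below) =====
def Claim_equal_modular_instructions : Prop := ∀ (modules : List (List (String × String))), Dom_modular_instructions modules → Pre_modular_instructions modules → Spec_modular_instructions modules (modular_instructions modules)

-- ===== LEMMAS AND PROOFS =====

-- spec lists: the step lines from counter c, and the (comma-less) format entries
def pvLines : Int → List (List (String × String)) → List (List Char)
  | _, [] => []
  | c, m :: ms =>
    match pvLookup m "name" with
    | some n => pvStepLine (c + 1) n ((pvLookup m "instruction").getD "") :: pvLines (c + 1) ms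
    | none => ((pvLookup m "instruction").getD "").toList :: pvLines c ms

def pvEntries : List (List (String × String)) → List (List Char)
  | [] => []
  | m :: ms =>
    match pvLookup m "name" with
    | some n => (if n ≠ "" then [pvEntryB n] else []) ++ pvEntries ms
    | none => pvEntries ms

lemma foldA_eq : ∀ (ms : List (List (String × String))) (p : List Char) (c : Int),
    (ms.foldl pvStepA (p, c)).1 = p ++ ((pvLines c ms).map (· ++ ['\n'])).flatten := by
  intro ms
  induction ms with
  | nil => intro p c; simp [pvLines]
  | cons m ms ih =>
    intro p c
    simp only [List.foldl_cons, pvStepA, pvLines]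
    cases pvLookup m "name" with
    | some n => simp [ih]
    | none => simp [ih]

lemma foldFmt_eq : ∀ (ms : List (List (String × String))) (acc : List Char),
    ms.foldl pvStepFmt acc = acc ++ ((pvEntries ms).map (· ++ [',', '\n'])).flatten := by
  intro ms
  induction ms with
  | nil => intro acc; simp [pvEntries]
  | cons m ms ih =>
    intro acc
    simp only [List.foldl_cons, pvStepFmt, pvEntries]
    cases pvLookup m "name" with
    | some n =>
      by_cases h : n = ""
      · simp [h, ih]
      · simp [h, ih, pvEntryB]
    | none => simp [ih]

lemma foldB_eq : ∀ (ms : List (List (String × String)))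
    (steps entries : List (List Char)) (c : Int),
    (ms.foldl pvStepB (steps, entries, c)).1 = steps ++ pvLines c ms ∧
    (ms.foldl pvStepB (steps, entries, c)).2.1 = entries ++ pvEntries ms := by
  intro ms
  induction ms with
  | nil => intro steps entries c; simp [pvLines, pvEntries]
  | cons m ms ih =>
    intro steps entries c
    simp only [List.foldl_cons, pvStepB, pvLines, pvEntries]
    cases pvLookup m "name" with
    | some n => exact ⟨((ih _ _ _).1.trans (by simp)), ((ih _ _ _).2.trans (by simp))⟩
    | none => exact ⟨((ih _ _ _).1.trans (by simp)), ((ih _ _ _).2.trans (by simp))⟩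

lemma join_concat (sep : List Char) : ∀ (ls : List (List Char)) (x : List Char),
    PySem.Chars.join sep (ls ++ [x]) = (ls.map (· ++ sep)).flatten ++ x := by
  intro ls
  induction ls with
  | nil => intro x; simp [PySem.Chars.join_singleton]
  | cons a ls ih =>
    intro x
    rcases ls with _ | ⟨b, ls'⟩
    · simp [PySem.Chars.join_cons_cons, PySem.Chars.join_singleton]
    · have := ih x
      simp only [List.cons_append] at this ⊢
      rw [PySem.Chars.join_cons_cons, this]
      simp

lemma rstrip_comma_nl (s : List Char) :
    pvRstripCommaNl (s ++ [',', '\n']) = pvRstripCommaNl s := by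
  simp [pvRstripCommaNl]

lemma rstrip_quote (t : List Char) :
    pvRstripCommaNl (t ++ ['"']) = t ++ ['"'] := by
  simp [pvRstripCommaNl]

lemma entries_end_quote : ∀ (ms : List (List (String × String))) (e : List Char),
    e ∈ pvEntries ms → ∃ t, e = t ++ ['"'] := by
  intro ms
  induction ms with
  | nil => intro e he; simp [pvEntries] at he
  | cons m ms ih =>
    intro e he
    simp only [pvEntries] at he
    cases h : pvLookup m "name" with
    | some n =>
      rw [h] at he
      rcases List.mem_append.mp he with h1 | h2
      · by_cases hn : n = ""
        · simp [hn] at h1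
        · simp [hn] at h1
          refine ⟨"    \"".toList ++ (PySem.Chars.lower n.toList) ++ "\": \"<your response>".toList, ?_⟩
          rw [h1]
          simp [pvEntryB]
      · exact ih e h2
    | none => rw [h] at he; exact ih e he

lemma join_nl_pack (L : List (List Char)) (f : List Char) :
    PySem.Chars.join ['\n'] (L ++ [[], f])
      = (L.map (· ++ ['\n'])).flatten ++ ['\n'] ++ f := by
  have h0 : L ++ [[], f] = (L ++ [[]]) ++ [f] := by simp
  rw [h0, join_concat]; simp

-- the two format blocks agree
lemma fmt_eq (ms : List (List (String × String))) :
    pvRstripCommaNl (ms.foldl pvStepFmt "Output Format:\n{\n".toList) ++ "\n}".toList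
    = if pvEntries ms ≠ [] then
        "Output Format:\n{\n".toList ++ PySem.Chars.join [',', '\n'] (pvEntries ms) ++ "\n}".toList
      else "Output Format:\n{\n}".toList := by
  rw [foldFmt_eq]
  rcases List.eq_nil_or_concat (pvEntries ms) with h | ⟨ls, x, h⟩
  · rw [h]; simp; decide
  · rw [List.concat_eq_append] at h
    have hx : ∃ t, x = t ++ ['"'] :=
      entries_end_quote ms x (by rw [h]; simp)
    rcases hx with ⟨t, ht⟩
    have hne : ¬ (ls ++ [x] : List (List Char)) = [] := by simp
    rw [h, if_pos hne, join_concat]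
    have h1 : ((ls ++ [x]).map (· ++ [',', '\n'])).flatten
        = (ls.map (· ++ [',', '\n'])).flatten ++ x ++ [',', '\n'] := by simp
    rw [h1]
    have h2 : "Output Format:\n{\n".toList
          ++ ((ls.map (· ++ [',', '\n'])).flatten ++ x ++ [',', '\n'])
        = ("Output Format:\n{\n".toList ++ (ls.map (· ++ [',', '\n'])).flatten ++ x)
          ++ [',', '\n'] := by simp
    rw [h2, rstrip_comma_nl, ht]
    have h3 : "Output Format:\n{\n".toList ++ (ls.map (· ++ [',', '\n'])).flatten ++ (t ++ ['"'])
        = ("Output Format:\n{\n".toList ++ (ls.map (· ++ [',', '\n'])).flatten ++ t) ++ ['"'] := by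
      simp
    rw [h3, rstrip_quote]
    simp

-- ===== VERDICT (by name: the statement is the Claim_ definition above) =====
theorem modular_instructions_spec : Claim_equal_modular_instructions := by
  intro modules _ _
  unfold Spec_modular_instructions
  simp only [modular_instructions, modular_instructions_alt, make_output_format]
  have hA := foldA_eq modules [] 0
  have hB := foldB_eq modules [] [] 0
  rw [hA, hB.1, hB.2, List.nil_append, List.nil_append, List.nil_append,
    join_nl_pack, fmt_eq]
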